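-- pv_equiv track=rewrite | github.com/Prakash44-dev/python-DSA | Arrays/arrays/leet300.py | lis_greedy_per_start
-- ===== SOURCE A (Python) =====
-- def lis_greedy_per_start(nums):
--     best = 0
--     for i in range(len(nums)):
--         seq = [nums[i]]                # start a new subsequence for this i
--         for j in range(i+1, len(nums)):
--             if nums[j] > seq[-1]:      # compare with last picked element
--                 seq.append(nums[j])
--         best = max(best, len(seq))
--     return best
-- ===== SOURCE B (Python) =====
-- def lis_greedy_per_start(nums):
--     # Right-to-left scan with a monotonic stack: one pass, O(n) total.
--     # stack holds (value, count) with values strictly increasing from top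
--     # (end of list) downward; count = greedy-pick length starting there.
--     stack = []
--     best = 0
--     for x in reversed(nums):
--         while stack and stack[-1][0] <= x:
--             stack.pop()
--         c = 1 + (stack[-1][1] if stack else 0)
--         stack.append((x, c))
--         if c > best:
--             best = c
--     return best
-- ===== Notes on version B (the rewrite author's own statement) =====
-- stated objective: faster
-- what changed: Replaces A's per-start greedy rescan of the remaining list (nested loops) by a single right-to-left pass maintaining a monotonic stack of (value, greedy-count) pairs, popping entries <= the current value.
import Mathlib
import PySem

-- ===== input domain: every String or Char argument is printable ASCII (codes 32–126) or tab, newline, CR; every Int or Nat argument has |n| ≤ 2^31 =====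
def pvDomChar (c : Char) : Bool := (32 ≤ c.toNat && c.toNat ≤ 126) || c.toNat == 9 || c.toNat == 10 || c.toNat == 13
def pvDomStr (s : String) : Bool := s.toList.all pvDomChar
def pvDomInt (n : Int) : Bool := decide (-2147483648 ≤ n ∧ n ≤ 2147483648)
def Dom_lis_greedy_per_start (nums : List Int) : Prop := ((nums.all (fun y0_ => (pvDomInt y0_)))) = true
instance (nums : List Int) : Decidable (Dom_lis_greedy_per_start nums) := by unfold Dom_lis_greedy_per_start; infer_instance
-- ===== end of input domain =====

-- B replaces A's quadratic per-start greedy rescans by one right-to-left pass with a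
-- monotonic (value, count) stack; objective: faster (asymptotic).

-- ===== PORT A =====
-- literal transliteration of A: outer loop over i, inner loop over j, seq kept as a list,
-- seq[-1] via pyGet? with negative index; indices produced by pyRange are always in range,
-- so the .getD 0 defaults are never taken and the port is exact.
def lis_greedy_per_start (nums : List Int) : Int :=
  (PySem.List.pyRange 0 (nums.length : Int) 1).foldl
    (fun best i =>
      let seq : List Int := [(PySem.List.pyGet? nums i).getD 0]
      let seq :=
        (PySem.List.pyRange (i + 1) (nums.length : Int) 1).foldl
          (fun seq j =>
            if (PySem.List.pyGet? nums j).getD 0 > (PySem.List.pyGet? seq (-1)).getD 0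
            then seq ++ [(PySem.List.pyGet? nums j).getD 0]
            else seq)
          seq
      max best (seq.length : Int))
    0

-- ===== PORT B =====
-- literal transliteration of Source B: single pass over reversed(nums); the stack keeps its
-- top at the HEAD of the list (push = cons), so Python's while/pop from the end becomes
-- dropWhile from the head — same pops in the same order.
def lis_greedy_per_start_alt (nums : List Int) : Int :=
  (nums.reverse.foldl
    (fun (st : List (Int × Int) × Int) x =>
      let stack := st.1.dropWhile (fun p => p.1 ≤ x)
      let c : Int := 1 + (match stack with | [] => 0 | p :: _ => p.2)
      ((x, c) :: stack, if c > st.2 then c else st.2))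
    ([], 0)).2

-- ===== PRECONDITION & SPEC =====
def Spec_lis_greedy_per_start (nums : List Int) (out : Int) : Prop := out = lis_greedy_per_start_alt nums
instance (nums : List Int) (out : Int) : Decidable (Spec_lis_greedy_per_start nums out) := by unfold Spec_lis_greedy_per_start; infer_instance

-- ===== CLAIM (what is proved, stated in full; the proofs are below) =====
def Claim_equal_lis_greedy_per_start : Prop := ∀ (nums : List Int), Dom_lis_greedy_per_start nums → Spec_lis_greedy_per_start nums (lis_greedy_per_start nums)

-- ===== LEMMAS AND PROOFS =====

-- Reference spec: g x s = length of the greedy strictly-increasing pick starting with x over s.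
def pvG (x : Int) : List Int → Int
  | [] => 1
  | y :: ys => if x < y then 1 + pvG y ys else pvG x ys

-- best over all suffix starts
def pvBest : List Int → Int
  | [] => 0
  | x :: ys => max (pvG x ys) (pvBest ys)

theorem pvG_pos (x : Int) (s : List Int) : 1 ≤ pvG x s := by
  induction s generalizing x with
  | nil => simp [pvG]
  | cons y ys ih =>
    simp only [pvG]; split
    · have := ih y; omega
    · exact ih x

theorem pvBest_nonneg (s : List Int) : 0 ≤ pvBest s := by
  cases s with
  | nil => simp [pvBest]
  | cons x ys => have := pvG_pos x ys; simp only [pvBest]; omega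

-- ---------- A side ----------

-- the inner fold of A, on suffix index j (as a Nat)
theorem lisA_inner (nums : List Int) (j : Nat) (hj : j ≤ nums.length) :
    ∀ (seq : List Int) (x : Int), seq.getLast? = some x →
      ((PySem.List.pyRange (j : Int) (nums.length : Int) 1).foldl
        (fun seq k =>
          if (PySem.List.pyGet? nums k).getD 0 > (PySem.List.pyGet? seq (-1)).getD 0
          then seq ++ [(PySem.List.pyGet? nums k).getD 0]
          else seq) seq).length
      = seq.length + (pvG x (nums.drop j)).toNat - 1 := by
  induction hn : nums.length - j generalizing j with
  | zero =>
    intro seq x hx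
    have hjn : j = nums.length := by omega
    rw [PySem.List.pyRange_one_eq_nil (by omega)]
    have : nums.drop j = [] := by simp [hjn]
    have hne : seq ≠ [] := by intro h; simp [h] at hx
    have h1 : 1 ≤ seq.length := List.length_pos_iff.mpr hne
    simp only [this, pvG, List.foldl_nil]
    omega
  | succ m ih =>
    intro seq x hx
    have hjlt : j < nums.length := by omega
    rw [PySem.List.pyRange_one_cons (by exact_mod_cast hjlt)]
    simp only [List.foldl_cons]
    have hget : (PySem.List.pyGet? nums (j : Int)).getD 0 = nums[j]?.getD 0 := by
      simp [PySem.List.pyGet?_natCast]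
    have hlast : (PySem.List.pyGet? seq (-1)).getD 0 = x := by
      rw [PySem.List.pyGet?_neg_one, hx]; rfl
    have hdropj : nums.drop j = nums[j]?.getD 0 :: nums.drop (j + 1) := by
      rw [List.drop_eq_getElem_cons hjlt]
      simp [List.getElem?_eq_getElem hjlt]
    have hj1 : ((j : Int) + 1) = ((j + 1 : Nat) : Int) := by push_cast; ring
    rw [hget, hlast, hj1]
    by_cases hcmp : nums[j]?.getD 0 > x
    · rw [if_pos hcmp]
      rw [ih (j + 1) (by omega) (by omega) (seq ++ [nums[j]?.getD 0]) (nums[j]?.getD 0) (by simp)]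
      rw [hdropj]
      simp only [pvG, if_pos hcmp]
      have h1 := pvG_pos (nums[j]?.getD 0) (nums.drop (j + 1))
      simp [List.length_append]
      omega
    · rw [if_neg hcmp]
      rw [ih (j + 1) (by omega) (by omega) seq x hx]
      rw [hdropj]
      simp only [pvG]
      rw [if_neg (by omega)]

-- the outer fold of A, on suffix index i (as a Nat)
theorem lisA_outer (nums : List Int) (i : Nat) (hi : i ≤ nums.length) :
    ∀ (best : Int), 0 ≤ best →
      (PySem.List.pyRange (i : Int) (nums.length : Int) 1).foldl
        (fun best k =>
          let seq : List Int := [(PySem.List.pyGet? nums k).getD 0]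
          let seq :=
            (PySem.List.pyRange (k + 1) (nums.length : Int) 1).foldl
              (fun seq j =>
                if (PySem.List.pyGet? nums j).getD 0 > (PySem.List.pyGet? seq (-1)).getD 0
                then seq ++ [(PySem.List.pyGet? nums j).getD 0]
                else seq) seq
          max best (seq.length : Int)) best
      = max best (pvBest (nums.drop i)) := by
  induction hn : nums.length - i generalizing i with
  | zero =>
    intro best hb
    have hin : i = nums.length := by omega
    rw [PySem.List.pyRange_one_eq_nil (by omega)]
    have : nums.drop i = [] := by simp [hin]
    simp [this, pvBest]
    omega
  | succ m ih =>
    intro best hb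
    have hilt : i < nums.length := by omega
    rw [PySem.List.pyRange_one_cons (by exact_mod_cast hilt)]
    simp only [List.foldl_cons]
    have hget : (PySem.List.pyGet? nums (i : Int)).getD 0 = nums[i]?.getD 0 := by
      simp [PySem.List.pyGet?_natCast]
    have hi1 : ((i : Int) + 1) = ((i + 1 : Nat) : Int) := by push_cast; ring
    have hdropi : nums.drop i = nums[i]?.getD 0 :: nums.drop (i + 1) := by
      rw [List.drop_eq_getElem_cons hilt]
      simp [List.getElem?_eq_getElem hilt]
    simp only [hget, hi1]
    rw [lisA_inner nums (i + 1) (by omega) [nums[i]?.getD 0] (nums[i]?.getD 0) (by simp)]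
    rw [ih (i + 1) (by omega) (by omega) _ (by positivity)]
    rw [hdropi]
    simp only [pvBest]
    have hg := pvG_pos (nums[i]?.getD 0) (nums.drop (i + 1))
    have : ((List.length [nums[i]?.getD 0] + (pvG (nums[i]?.getD 0) (nums.drop (i + 1))).toNat - 1 : Nat) : Int)
        = pvG (nums[i]?.getD 0) (nums.drop (i + 1)) := by
      simp; omega
    rw [this]
    omega

theorem lisA_eq_pvBest (nums : List Int) : lis_greedy_per_start nums = pvBest nums := by
  unfold lis_greedy_per_start
  have h := lisA_outer nums 0 (by omega) 0 le_rfl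
  simpa [max_eq_right (pvBest_nonneg nums)] using h

-- ---------- B side ----------

def pvHeadC : List (Int × Int) → Int
  | [] => 0
  | p :: _ => p.2

-- popping up to a smaller threshold first does not change a later pop
theorem dropWhile_dropWhile (l : List (Int × Int)) (x y : Int) (hyx : y ≤ x) :
    (l.dropWhile (fun p => p.1 ≤ y)).dropWhile (fun p => p.1 ≤ x)
      = l.dropWhile (fun p => p.1 ≤ x) := by
  induction l with
  | nil => simp
  | cons p ps ih =>
    by_cases h : p.1 ≤ y
    · rw [List.dropWhile_cons_of_pos (by simpa using h), ih,
        List.dropWhile_cons_of_pos (by simp; omega)]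
    · rw [List.dropWhile_cons_of_neg (by simpa using h)]

-- the B fold invariant: after processing list s (right-to-left), best = pvBest s and the
-- stack answers greedy-count queries for any start value x
theorem lisB_invariant (s : List Int) :
    (s.foldr
      (fun x (st : List (Int × Int) × Int) =>
        let stack := st.1.dropWhile (fun p => p.1 ≤ x)
        let c : Int := 1 + (match stack with | [] => 0 | p :: _ => p.2)
        ((x, c) :: stack, if c > st.2 then c else st.2))
      ([], 0)).2 = pvBest s
    ∧ ∀ x : Int,
      pvG x s = 1 + pvHeadC ((s.foldr
        (fun x (st : List (Int × Int) × Int) =>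
          let stack := st.1.dropWhile (fun p => p.1 ≤ x)
          let c : Int := 1 + (match stack with | [] => 0 | p :: _ => p.2)
          ((x, c) :: stack, if c > st.2 then c else st.2))
        ([], 0)).1.dropWhile (fun p => p.1 ≤ x)) := by
  induction s with
  | nil => constructor <;> simp [pvBest, pvG, pvHeadC]
  | cons y ys ih =>
    obtain ⟨ihb, ihs⟩ := ih
    simp only [List.foldr_cons]
    set st := ys.foldr
      (fun x (st : List (Int × Int) × Int) =>
        let stack := st.1.dropWhile (fun p => p.1 ≤ x)
        let c : Int := 1 + (match stack with | [] => 0 | p :: _ => p.2)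
        ((x, c) :: stack, if c > st.2 then c else st.2))
      ([], 0) with hst
    have hcy : (1 + (match st.1.dropWhile (fun p => p.1 ≤ y) with | [] => 0 | p :: _ => p.2) : Int)
        = pvG y ys := by
      rw [ihs y]; cases st.1.dropWhile (fun p => p.1 ≤ y) <;> simp [pvHeadC]
    constructor
    · simp only [hcy]
      rw [pvBest]
      rw [ihb]
      by_cases h : pvG y ys > pvBest ys
      · rw [if_pos h]; omega
      · rw [if_neg h]; omega
    · intro x
      by_cases hxy : y ≤ x
      · -- y gets popped; the remaining pops coincide with popping directly up to x
        rw [List.dropWhile_cons_of_pos (by simpa using hxy)]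
        rw [dropWhile_dropWhile st.1 x y hxy]
        rw [pvG]
        rw [if_neg (by omega)]
        exact ihs x
      · -- y stays on top: its stored count is pvG y ys
        rw [List.dropWhile_cons_of_neg (by simpa using hxy)]
        rw [pvG, if_pos (by omega)]
        simp [pvHeadC, hcy]

theorem lisB_eq_pvBest (nums : List Int) : lis_greedy_per_start_alt nums = pvBest nums := by
  unfold lis_greedy_per_start_alt
  rw [List.foldl_reverse]
  exact (lisB_invariant nums).1

-- ===== VERDICT (by name: the statement is the Claim_ definition above) =====
theorem lis_greedy_per_start_spec : Claim_equal_lis_greedy_per_start := by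
  intro nums _
  unfold Spec_lis_greedy_per_start
  rw [lisA_eq_pvBest, lisB_eq_pvBest]
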